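-- pv_equiv track=rewrite | github.com/Richard-Wth/DataFlywheel | src/data_gen.py | _strip_latex_wrappers
-- ===== SOURCE A (Python) =====
-- def _strip_latex_wrappers(s: str) -> str:
--     """Strip common LaTeX math wrappers like \\( ... \\), $$...$$, $...$."""
--     if not isinstance(s, str):
--         return ""
--     t = s.strip()
--     # Remove surrounding \(...\) repeatedly
--     while t.startswith("\\(") and t.endswith("\\)"):
--         t = t[2:-2].strip()
--     # Remove surrounding $$...$$
--     while t.startswith("$$") and t.endswith("$$") and len(t) >= 4:
--         t = t[2:-2].strip()
--     # Remove surrounding $...$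
--     while t.startswith("$") and t.endswith("$") and len(t) >= 2:
--         t = t[1:-1].strip()
--     return t
-- ===== SOURCE B (Python) =====
-- def _strip_latex_wrappers(s: str) -> str:
--     """Two-pointer rewrite: never builds intermediate strings; moves indices
--     i, j over the original string and returns a single final slice."""
--     if not isinstance(s, str):
--         return ""
--
--     def skip(i, j):
--         while i < j and s[i].isspace():
--             i += 1
--         while i < j and s[j - 1].isspace():
--             j -= 1
--         return i, j
--
--     i, j = skip(0, len(s))
--     while j - i >= 4 and s[i] == "\\" and s[i + 1] == "(" and s[j - 1] == ")" and s[j - 2] == "\\":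
--         i, j = skip(i + 2, j - 2)
--     while j - i >= 4 and s[i] == "$" and s[i + 1] == "$" and s[j - 1] == "$" and s[j - 2] == "$":
--         i, j = skip(i + 2, j - 2)
--     while j - i >= 2 and s[i] == "$" and s[j - 1] == "$":
--         i, j = skip(i + 1, j - 1)
--     return s[i:j]
-- ===== Notes on version B (the rewrite author's own statement) =====
-- stated objective: alternative
-- what changed: B replaces A's repeated slice-and-strip string rebuilding with a two-pointer scan: indices i and j move inward over the original string (whitespace skipping and wrapper peeling are pure index arithmetic) and a single final slice s[i:j] is taken.
import Mathlib
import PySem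

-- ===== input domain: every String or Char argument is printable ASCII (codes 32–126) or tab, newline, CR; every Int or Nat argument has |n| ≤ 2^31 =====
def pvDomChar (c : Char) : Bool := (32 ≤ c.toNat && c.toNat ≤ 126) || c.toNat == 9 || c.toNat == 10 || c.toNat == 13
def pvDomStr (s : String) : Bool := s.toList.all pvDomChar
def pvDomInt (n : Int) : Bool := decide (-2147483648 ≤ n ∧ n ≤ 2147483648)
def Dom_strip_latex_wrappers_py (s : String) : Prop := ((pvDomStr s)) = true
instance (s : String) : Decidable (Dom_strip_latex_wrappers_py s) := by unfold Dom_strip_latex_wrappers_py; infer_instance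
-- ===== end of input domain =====

-- B is a two-pointer rewrite: it moves indices i, j over the original string instead of
-- repeatedly slicing and re-stripping new strings, and returns one final slice; objective: alternative.

-- termination helper for A's peel steps (strip can only shorten, the slice drops ≥ 1 char)
theorem pv_strip_len_le (l : List Char) :
    (PySem.Chars.strip l).length ≤ l.length := by
  simp only [PySem.Chars.strip, PySem.Chars.rstrip, PySem.Chars.lstrip, List.length_reverse]
  calc (List.dropWhile PySem.Chars.isspace (List.dropWhile PySem.Chars.isspace l).reverse).length
      ≤ (List.dropWhile PySem.Chars.isspace l).reverse.length := List.length_dropWhile_le _ _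
    _ ≤ l.length := by simpa using List.length_dropWhile_le _ l

theorem pv_peel_lt (t : List Char) (a c : Nat) (hc : 0 < c) (ht : 0 < t.length) :
    (PySem.Chars.strip (PySem.Chars.slice t (some (a : Int)) (some (-(c : Int))))).length
      < t.length := by
  have h1 := pv_strip_len_le (PySem.Chars.slice t (some (a : Int)) (some (-(c : Int))))
  have h2 : (PySem.Chars.slice t (some (a : Int)) (some (-(c : Int)))).length
      = PySem.List.clampIdx t.length (-(c : Int)) - PySem.List.clampIdx t.length (a : Int) := by
    simp [PySem.List.length_slice]
  have h3 : PySem.List.clampIdx t.length (-(c : Int)) = t.length - c :=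
    PySem.List.clampIdx_neg_natCast _ _ hc
  have h4 : PySem.List.clampIdx t.length (a : Int) = min a t.length :=
    PySem.List.clampIdx_natCast _ _
  omega

theorem pv_startswith_len {t o : List Char}
    (h : PySem.Chars.startswith t o = true) : o.length ≤ t.length :=
  ((PySem.Chars.startswith_iff t o).1 h).length_le

-- ===== PORT A =====
-- the three while-loops of A, as structural recursions on the shrinking string;
-- the isinstance guard is vacuous under the type convention (s is always a str)
def pvALoop1 (t : List Char) : List Char :=
  if h : PySem.Chars.startswith t ['\\', '('] && PySem.Chars.endswith t ['\\', ')'] then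
    pvALoop1 (PySem.Chars.strip (PySem.Chars.slice t (some 2) (some (-2))))
  else t
termination_by t.length
decreasing_by
  simp only [Bool.and_eq_true, decide_eq_true_eq, PySem.Chars.len_eq] at h
  have hl : (2 : Nat) ≤ t.length := by simpa using pv_startswith_len h.1
  exact pv_peel_lt t 2 2 (by omega) (by omega)

def pvALoop2 (t : List Char) : List Char :=
  if h : PySem.Chars.startswith t ['$', '$'] && PySem.Chars.endswith t ['$', '$']
      && decide (4 ≤ PySem.Chars.len t) then
    pvALoop2 (PySem.Chars.strip (PySem.Chars.slice t (some 2) (some (-2))))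
  else t
termination_by t.length
decreasing_by
  simp only [Bool.and_eq_true, decide_eq_true_eq, PySem.Chars.len_eq] at h
  have hl : (2 : Nat) ≤ t.length := by simpa using pv_startswith_len h.1.1
  exact pv_peel_lt t 2 2 (by omega) (by omega)

def pvALoop3 (t : List Char) : List Char :=
  if h : PySem.Chars.startswith t ['$'] && PySem.Chars.endswith t ['$']
      && decide (2 ≤ PySem.Chars.len t) then
    pvALoop3 (PySem.Chars.strip (PySem.Chars.slice t (some 1) (some (-1))))
  else t
termination_by t.length
decreasing_by
  simp only [Bool.and_eq_true, decide_eq_true_eq, PySem.Chars.len_eq] at h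
  have hl : (1 : Nat) ≤ t.length := by simpa using pv_startswith_len h.1.1
  exact pv_peel_lt t 1 1 (by omega) (by omega)

def strip_latex_wrappers_py (s : String) : String :=
  String.ofList (pvALoop3 (pvALoop2 (pvALoop1 (PySem.Chars.strip s.toList))))

-- ===== PORT B =====
-- Source B's inner helper 'skip': the two whitespace-skipping while loops over the indices.
-- Indices are always in range under the invariant i < j ≤ l.length, so l.getD i ' ' is s[i].
def pvSkipL (l : List Char) (j i : Nat) : Nat :=
  if h : i < j ∧ PySem.Chars.isspace (l.getD i ' ') = true then pvSkipL l j (i + 1) else i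
termination_by j - i
decreasing_by omega

def pvSkipR (l : List Char) (i j : Nat) : Nat :=
  if h : i < j ∧ PySem.Chars.isspace (l.getD (j - 1) ' ') = true then pvSkipR l i (j - 1) else j
termination_by j
decreasing_by omega

def pvSkip (l : List Char) (i j : Nat) : Nat × Nat :=
  (pvSkipL l j i, pvSkipR l (pvSkipL l j i) j)

-- bound facts the phase loops cite for termination
theorem pvSkipL_ge (l : List Char) (j i : Nat) : i ≤ pvSkipL l j i := by
  rw [pvSkipL]
  split
  · exact le_trans (by omega) (pvSkipL_ge l j (i + 1))
  · exact le_refl i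
termination_by j - i
decreasing_by omega

theorem pvSkipL_le (l : List Char) (j i : Nat) (h : i ≤ j) : pvSkipL l j i ≤ j := by
  rw [pvSkipL]
  split
  · next hg => exact pvSkipL_le l j (i + 1) (by omega)
  · exact h
termination_by j - i
decreasing_by omega

theorem pvSkipR_le (l : List Char) (i j : Nat) : pvSkipR l i j ≤ j := by
  rw [pvSkipR]
  split
  · next hg => exact le_trans (pvSkipR_le l i (j - 1)) (by omega)
  · exact le_refl j
termination_by j
decreasing_by omega

theorem pvSkipR_ge (l : List Char) (i j : Nat) (h : i ≤ j) : i ≤ pvSkipR l i j := by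
  rw [pvSkipR]
  split
  · next hg => exact pvSkipR_ge l i (j - 1) (by omega)
  · exact h
termination_by j
decreasing_by omega

theorem pvSkip_bounds (l : List Char) (i j : Nat) (h : i ≤ j) :
    i ≤ (pvSkip l i j).1 ∧ (pvSkip l i j).1 ≤ (pvSkip l i j).2 ∧ (pvSkip l i j).2 ≤ j := by
  refine ⟨pvSkipL_ge l j i, pvSkipR_ge l _ j (pvSkipL_le l j i h), pvSkipR_le l _ j⟩

-- Source B's three while loops over the index pair
def pvPhase1 (l : List Char) (i j : Nat) : Nat × Nat :=
  if h : i + 4 ≤ j ∧ l.getD i ' ' = '\\' ∧ l.getD (i + 1) ' ' = '(' ∧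
      l.getD (j - 1) ' ' = ')' ∧ l.getD (j - 2) ' ' = '\\' then
    pvPhase1 l (pvSkip l (i + 2) (j - 2)).1 (pvSkip l (i + 2) (j - 2)).2
  else (i, j)
termination_by j - i
decreasing_by
  have := pvSkip_bounds l (i + 2) (j - 2) (by omega)
  omega

def pvPhase2 (l : List Char) (i j : Nat) : Nat × Nat :=
  if h : i + 4 ≤ j ∧ l.getD i ' ' = '$' ∧ l.getD (i + 1) ' ' = '$' ∧
      l.getD (j - 1) ' ' = '$' ∧ l.getD (j - 2) ' ' = '$' then
    pvPhase2 l (pvSkip l (i + 2) (j - 2)).1 (pvSkip l (i + 2) (j - 2)).2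
  else (i, j)
termination_by j - i
decreasing_by
  have := pvSkip_bounds l (i + 2) (j - 2) (by omega)
  omega

def pvPhase3 (l : List Char) (i j : Nat) : Nat × Nat :=
  if h : i + 2 ≤ j ∧ l.getD i ' ' = '$' ∧ l.getD (j - 1) ' ' = '$' then
    pvPhase3 l (pvSkip l (i + 1) (j - 1)).1 (pvSkip l (i + 1) (j - 1)).2
  else (i, j)
termination_by j - i
decreasing_by
  have := pvSkip_bounds l (i + 1) (j - 1) (by omega)
  omega

def strip_latex_wrappers_py_alt (s : String) : String :=
  let l := s.toList
  let p0 := pvSkip l 0 l.length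
  let p1 := pvPhase1 l p0.1 p0.2
  let p2 := pvPhase2 l p1.1 p1.2
  let p3 := pvPhase3 l p2.1 p2.2
  String.ofList (PySem.Chars.slice l (some (p3.1 : Int)) (some (p3.2 : Int)))

-- ===== PRECONDITION & SPEC =====
def Spec_strip_latex_wrappers_py (s : String) (out : String) : Prop := out = strip_latex_wrappers_py_alt s
instance (s : String) (out : String) : Decidable (Spec_strip_latex_wrappers_py s out) := by unfold Spec_strip_latex_wrappers_py; infer_instance

-- ===== CLAIM (what is proved, stated in full; the proofs are below) =====
def Claim_equal_strip_latex_wrappers_py : Prop := ∀ (s : String), Dom_strip_latex_wrappers_py s → Spec_strip_latex_wrappers_py s (strip_latex_wrappers_py s)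

-- ===== LEMMAS AND PROOFS =====

-- the window l[i:j] that the pointer pair (i, j) denotes
def pvE (l : List Char) (i j : Nat) : List Char := (l.drop i).take (j - i)

theorem pvE_len (l : List Char) (i j : Nat) (hj : j ≤ l.length) :
    (pvE l i j).length = j - i := by
  simp [pvE]; omega

theorem pvE_cons (l : List Char) (i j : Nat) (hi : i < j) (hj : j ≤ l.length) :
    pvE l i j = l.getD i ' ' :: pvE l (i + 1) j := by
  have hil : i < l.length := lt_of_lt_of_le hi hj
  have hji : j - i = (j - (i + 1)) + 1 := by omega
  rw [pvE, List.drop_eq_getElem_cons hil, List.getD_eq_getElem l ' ' hil, hji,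
    List.take_succ_cons, pvE]

theorem pvE_snoc (l : List Char) (i j : Nat) (hi : i < j) (hj : j ≤ l.length) :
    pvE l i j = pvE l i (j - 1) ++ [l.getD (j - 1) ' '] := by
  have h1 : j - 1 < l.length := by omega
  have hji : j - i = (j - 1 - i) + 1 := by omega
  rw [pvE, pvE, hji, List.take_add_one]
  congr 1
  rw [List.getElem?_drop]
  have : i + (j - 1 - i) = j - 1 := by omega
  rw [this, List.getElem?_eq_getElem h1, List.getD_eq_getElem l ' ' h1]
  rfl

-- strip over the window = moving the pointers
theorem pv_lstrip_E (l : List Char) (j i : Nat) (hj : j ≤ l.length) :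
    PySem.Chars.lstrip (pvE l i j) = pvE l (pvSkipL l j i) j := by
  rw [pvSkipL]
  split
  · next h =>
    rw [pvE_cons l i j h.1 hj]
    simp only [PySem.Chars.lstrip, List.dropWhile_cons, h.2, if_true]
    exact pv_lstrip_E l j (i + 1) hj
  · next h =>
    by_cases hij : i < j
    · have hsp : PySem.Chars.isspace (l.getD i ' ') = false := by
        cases hx : PySem.Chars.isspace (l.getD i ' ') with
        | false => rfl
        | true => exact absurd ⟨hij, hx⟩ h
      rw [pvE_cons l i j hij hj]
      simp only [PySem.Chars.lstrip, List.dropWhile_cons, hsp]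
      simp
    · have hz : j - i = 0 := by omega
      simp [pvE, hz, PySem.Chars.lstrip]
termination_by j - i
decreasing_by omega

theorem pv_rstrip_snoc_space {u : List Char} {c : Char}
    (hc : PySem.Chars.isspace c = true) :
    PySem.Chars.rstrip (u ++ [c]) = PySem.Chars.rstrip u := by
  simp [PySem.Chars.rstrip, List.dropWhile_cons, hc]

theorem pv_rstrip_snoc_nospace {u : List Char} {c : Char}
    (hc : PySem.Chars.isspace c = false) :
    PySem.Chars.rstrip (u ++ [c]) = u ++ [c] := by
  simp [PySem.Chars.rstrip, List.dropWhile_cons, hc]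

theorem pv_rstrip_E (l : List Char) (i j : Nat) (hij : i ≤ j) (hj : j ≤ l.length) :
    PySem.Chars.rstrip (pvE l i j) = pvE l i (pvSkipR l i j) := by
  rw [pvSkipR]
  split
  · next h =>
    rw [pvE_snoc l i j h.1 hj, pv_rstrip_snoc_space h.2]
    exact pv_rstrip_E l i (j - 1) (by omega) (by omega)
  · next h =>
    by_cases hij' : i < j
    · have hsp : PySem.Chars.isspace (l.getD (j - 1) ' ') = false := by
        cases hx : PySem.Chars.isspace (l.getD (j - 1) ' ') with
        | false => rfl
        | true => exact absurd ⟨hij', hx⟩ h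
      rw [pvE_snoc l i j hij' hj, pv_rstrip_snoc_nospace hsp, ← pvE_snoc l i j hij' hj]
    · have hz : j - i = 0 := by omega
      simp [pvE, hz, PySem.Chars.rstrip]
termination_by j
decreasing_by omega

theorem pv_strip_E (l : List Char) (i j : Nat) (hij : i ≤ j) (hj : j ≤ l.length) :
    PySem.Chars.strip (pvE l i j) = pvE l (pvSkip l i j).1 (pvSkip l i j).2 := by
  rw [PySem.Chars.strip, pv_lstrip_E l j i hj,
    pv_rstrip_E l (pvSkipL l j i) j (pvSkipL_le l j i hij) hj]
  rfl

-- startswith / endswith over the window = character tests at the pointers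
theorem pv_sw2 (l : List Char) (i j : Nat) (a b : Char) (hj : j ≤ l.length) :
    PySem.Chars.startswith (pvE l i j) [a, b] = true ↔
      i + 2 ≤ j ∧ l.getD i ' ' = a ∧ l.getD (i + 1) ' ' = b := by
  by_cases h2 : i + 2 ≤ j
  · rw [pvE_cons l i j (by omega) hj, pvE_cons l (i + 1) j (by omega) hj,
      PySem.Chars.startswith_iff]
    simp [List.cons_prefix_cons, h2, eq_comm]
  · constructor
    · intro h
      have hle := (pv_startswith_len h)
      have : (pvE l i j).length = j - i := pvE_len l i j hj
      simp at hle
      omega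
    · intro h; exact absurd h.1 h2

theorem pv_sw1 (l : List Char) (i j : Nat) (a : Char) (hj : j ≤ l.length) :
    PySem.Chars.startswith (pvE l i j) [a] = true ↔
      i + 1 ≤ j ∧ l.getD i ' ' = a := by
  by_cases h1 : i + 1 ≤ j
  · rw [pvE_cons l i j (by omega) hj, PySem.Chars.startswith_iff]
    simp [List.cons_prefix_cons, h1, eq_comm]
  · constructor
    · intro h
      have hle := (pv_startswith_len h)
      have : (pvE l i j).length = j - i := pvE_len l i j hj
      simp at hle
      omega
    · intro h; exact absurd h.1 h1

theorem pv_suffix_len {t p : List Char}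
    (h : PySem.Chars.endswith t p = true) : p.length ≤ t.length :=
  ((PySem.Chars.endswith_iff t p).1 h).length_le

theorem pv_ew2 (l : List Char) (i j : Nat) (a b : Char) (hj : j ≤ l.length) :
    PySem.Chars.endswith (pvE l i j) [a, b] = true ↔
      i + 2 ≤ j ∧ l.getD (j - 2) ' ' = a ∧ l.getD (j - 1) ' ' = b := by
  by_cases h2 : i + 2 ≤ j
  · rw [pvE_snoc l i j (by omega) hj, pvE_snoc l i (j - 1) (by omega) (by omega),
      PySem.Chars.endswith_iff]
    have : j - 1 - 1 = j - 2 := by omega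
    rw [this]
    constructor
    · intro h
      have h' : [a, b].reverse <+: (pvE l i (j - 2) ++ [l.getD (j - 2) ' '] ++ [l.getD (j - 1) ' ']).reverse :=
        List.reverse_prefix.mpr h
      simp [List.cons_prefix_cons] at h'
      exact ⟨h2, by simpa [List.getD_eq_getElem?_getD] using h'.2.symm,
        by simpa [List.getD_eq_getElem?_getD] using h'.1.symm⟩
    · intro ⟨_, ha, hb⟩
      rw [ha, hb]
      simp [List.suffix_append_of_suffix]
  · constructor
    · intro h
      have hle := pv_suffix_len h
      have : (pvE l i j).length = j - i := pvE_len l i j hj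
      simp at hle
      omega
    · intro h; exact absurd h.1 h2

theorem pv_ew1 (l : List Char) (i j : Nat) (a : Char) (hj : j ≤ l.length) :
    PySem.Chars.endswith (pvE l i j) [a] = true ↔
      i + 1 ≤ j ∧ l.getD (j - 1) ' ' = a := by
  by_cases h1 : i + 1 ≤ j
  · rw [pvE_snoc l i j (by omega) hj, PySem.Chars.endswith_iff]
    constructor
    · intro h
      have h' : [a].reverse <+: (pvE l i (j - 1) ++ [l.getD (j - 1) ' ']).reverse :=
        List.reverse_prefix.mpr h
      simp [List.cons_prefix_cons] at h'
      exact ⟨h1, by simpa [List.getD_eq_getElem?_getD] using h'.symm⟩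
    · intro ⟨_, ha⟩
      rw [ha]
      simp
  · constructor
    · intro h
      have hle := pv_suffix_len h
      have : (pvE l i j).length = j - i := pvE_len l i j hj
      simp at hle
      omega
    · intro h; exact absurd h.1 h1

-- A's t[a:-c] on the window = moving both pointers
theorem pv_slice22 (l : List Char) (i j : Nat) (h4 : i + 4 ≤ j) (hj : j ≤ l.length) :
    PySem.Chars.slice (pvE l i j) (some 2) (some (-2)) = pvE l (i + 2) (j - 2) := by
  have hlen : (pvE l i j).length = j - i := pvE_len l i j hj
  rw [PySem.Chars.slice_eq_listSlice]
  rw [show ((-2 : Int)) = -((2 : Nat) : Int) by norm_num,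
    show ((2 : Int)) = ((2 : Nat) : Int) by norm_num]
  simp only [PySem.List.slice, PySem.List.clampIdx_neg_natCast _ 2 (by omega),
    PySem.List.clampIdx_natCast, hlen]
  have hmin : min (2 : Nat) (j - i) = 2 := by omega
  rw [hmin, pvE, pvE, List.drop_take, List.drop_drop, List.take_take]
  congr 1
  omega

theorem pv_slice11 (l : List Char) (i j : Nat) (h2 : i + 2 ≤ j) (hj : j ≤ l.length) :
    PySem.Chars.slice (pvE l i j) (some 1) (some (-1)) = pvE l (i + 1) (j - 1) := by
  have hlen : (pvE l i j).length = j - i := pvE_len l i j hj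
  rw [PySem.Chars.slice_eq_listSlice]
  rw [show ((-1 : Int)) = -((1 : Nat) : Int) by norm_num,
    show ((1 : Int)) = ((1 : Nat) : Int) by norm_num]
  simp only [PySem.List.slice, PySem.List.clampIdx_neg_natCast _ 1 (by omega),
    PySem.List.clampIdx_natCast, hlen]
  have hmin : min (1 : Nat) (j - i) = 1 := by omega
  rw [hmin, pvE, pvE, List.drop_take, List.drop_drop, List.take_take]
  congr 1
  omega

-- phase 1: A's \( ... \) loop = B's pointer loop
theorem pv_phase1_E (l : List Char) (i j : Nat) (hij : i ≤ j) (hj : j ≤ l.length) :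
    pvALoop1 (pvE l i j) = pvE l (pvPhase1 l i j).1 (pvPhase1 l i j).2 ∧
      i ≤ (pvPhase1 l i j).1 ∧ (pvPhase1 l i j).1 ≤ (pvPhase1 l i j).2 ∧
      (pvPhase1 l i j).2 ≤ j := by
  rw [pvPhase1]
  split
  · next h =>
    obtain ⟨h4, hc1, hc2, hc3, hc4⟩ := h
    have hsw : PySem.Chars.startswith (pvE l i j) ['\\', '('] = true :=
      (pv_sw2 l i j _ _ hj).2 ⟨by omega, hc1, hc2⟩
    have hew : PySem.Chars.endswith (pvE l i j) ['\\', ')'] = true :=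
      (pv_ew2 l i j _ _ hj).2 ⟨by omega, hc4, hc3⟩
    rw [pvALoop1, dif_pos (by simp [hsw, hew]),
      pv_slice22 l i j h4 hj, pv_strip_E l (i + 2) (j - 2) (by omega) (by omega)]
    obtain ⟨hb1, hb2, hb3⟩ := pvSkip_bounds l (i + 2) (j - 2) (by omega)
    have ih := pv_phase1_E l (pvSkip l (i + 2) (j - 2)).1 (pvSkip l (i + 2) (j - 2)).2
      hb2 (by omega)
    exact ⟨ih.1, by omega, ih.2.2.1, by omega⟩
  · next h =>
    rw [pvALoop1, dif_neg ?_]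
    · exact ⟨rfl, le_refl _, hij, le_refl _⟩
    · intro hc
      simp only [Bool.and_eq_true] at hc
      obtain ⟨hA2, hcA1, hcA2⟩ := (pv_sw2 l i j _ _ hj).1 hc.1
      obtain ⟨_, hcB1, hcB2⟩ := (pv_ew2 l i j _ _ hj).1 hc.2
      have h4 : i + 4 ≤ j := by
        by_contra h4n
        rcases Nat.lt_or_ge (j - i) 3 with hlt | hge
        · have he : i + 1 = j - 1 := by omega
          rw [he] at hcA2
          rw [hcA2] at hcB2
          exact absurd hcB2 (by decide)
        · have he : i + 1 = j - 2 := by omega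
          rw [he] at hcA2
          rw [hcA2] at hcB1
          exact absurd hcB1 (by decide)
      exact h ⟨h4, hcA1, hcA2, hcB2, hcB1⟩
termination_by j - i
decreasing_by
  have := pvSkip_bounds l (i + 2) (j - 2) (by omega)
  omega

-- phase 2: A's $$ ... $$ loop = B's pointer loop
theorem pv_phase2_E (l : List Char) (i j : Nat) (hij : i ≤ j) (hj : j ≤ l.length) :
    pvALoop2 (pvE l i j) = pvE l (pvPhase2 l i j).1 (pvPhase2 l i j).2 ∧
      i ≤ (pvPhase2 l i j).1 ∧ (pvPhase2 l i j).1 ≤ (pvPhase2 l i j).2 ∧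
      (pvPhase2 l i j).2 ≤ j := by
  rw [pvPhase2]
  split
  · next h =>
    obtain ⟨h4, hc1, hc2, hc3, hc4⟩ := h
    have hsw : PySem.Chars.startswith (pvE l i j) ['$', '$'] = true :=
      (pv_sw2 l i j _ _ hj).2 ⟨by omega, hc1, hc2⟩
    have hew : PySem.Chars.endswith (pvE l i j) ['$', '$'] = true :=
      (pv_ew2 l i j _ _ hj).2 ⟨by omega, hc4, hc3⟩
    have hlen : 4 ≤ (pvE l i j).length := by
      rw [pvE_len l i j hj]; omega
    rw [pvALoop2, dif_pos (by simp [hsw, hew, PySem.Chars.len_eq, hlen]),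
      pv_slice22 l i j h4 hj, pv_strip_E l (i + 2) (j - 2) (by omega) (by omega)]
    obtain ⟨hb1, hb2, hb3⟩ := pvSkip_bounds l (i + 2) (j - 2) (by omega)
    have ih := pv_phase2_E l (pvSkip l (i + 2) (j - 2)).1 (pvSkip l (i + 2) (j - 2)).2
      hb2 (by omega)
    exact ⟨ih.1, by omega, ih.2.2.1, by omega⟩
  · next h =>
    rw [pvALoop2, dif_neg ?_]
    · exact ⟨rfl, le_refl _, hij, le_refl _⟩
    · intro hc
      simp only [Bool.and_eq_true, decide_eq_true_eq] at hc
      obtain ⟨_, hcA1, hcA2⟩ := (pv_sw2 l i j _ _ hj).1 hc.1.1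
      obtain ⟨_, hcB1, hcB2⟩ := (pv_ew2 l i j _ _ hj).1 hc.1.2
      have hlen := hc.2
      rw [PySem.Chars.len_eq, pvE_len l i j hj] at hlen
      exact h ⟨by omega, hcA1, hcA2, hcB2, hcB1⟩
termination_by j - i
decreasing_by
  have := pvSkip_bounds l (i + 2) (j - 2) (by omega)
  omega

-- phase 3: A's $ ... $ loop = B's pointer loop
theorem pv_phase3_E (l : List Char) (i j : Nat) (hij : i ≤ j) (hj : j ≤ l.length) :
    pvALoop3 (pvE l i j) = pvE l (pvPhase3 l i j).1 (pvPhase3 l i j).2 ∧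
      i ≤ (pvPhase3 l i j).1 ∧ (pvPhase3 l i j).1 ≤ (pvPhase3 l i j).2 ∧
      (pvPhase3 l i j).2 ≤ j := by
  rw [pvPhase3]
  split
  · next h =>
    obtain ⟨h2, hc1, hc2⟩ := h
    have hsw : PySem.Chars.startswith (pvE l i j) ['$'] = true :=
      (pv_sw1 l i j _ hj).2 ⟨by omega, hc1⟩
    have hew : PySem.Chars.endswith (pvE l i j) ['$'] = true :=
      (pv_ew1 l i j _ hj).2 ⟨by omega, hc2⟩
    have hlen : 2 ≤ (pvE l i j).length := by
      rw [pvE_len l i j hj]; omega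
    rw [pvALoop3, dif_pos (by simp [hsw, hew, PySem.Chars.len_eq, hlen]),
      pv_slice11 l i j h2 hj, pv_strip_E l (i + 1) (j - 1) (by omega) (by omega)]
    obtain ⟨hb1, hb2, hb3⟩ := pvSkip_bounds l (i + 1) (j - 1) (by omega)
    have ih := pv_phase3_E l (pvSkip l (i + 1) (j - 1)).1 (pvSkip l (i + 1) (j - 1)).2
      hb2 (by omega)
    exact ⟨ih.1, by omega, ih.2.2.1, by omega⟩
  · next h =>
    rw [pvALoop3, dif_neg ?_]
    · exact ⟨rfl, le_refl _, hij, le_refl _⟩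
    · intro hc
      simp only [Bool.and_eq_true, decide_eq_true_eq] at hc
      obtain ⟨_, hcA1⟩ := (pv_sw1 l i j _ hj).1 hc.1.1
      obtain ⟨_, hcB1⟩ := (pv_ew1 l i j _ hj).1 hc.1.2
      have hlen := hc.2
      rw [PySem.Chars.len_eq, pvE_len l i j hj] at hlen
      exact h ⟨by omega, hcA1, hcB1⟩
termination_by j - i
decreasing_by
  have := pvSkip_bounds l (i + 1) (j - 1) (by omega)
  omega

-- ===== VERDICT (by name: the statement is the Claim_ definition above) =====
theorem strip_latex_wrappers_py_spec : Claim_equal_strip_latex_wrappers_py := by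
  intro s _
  unfold Spec_strip_latex_wrappers_py strip_latex_wrappers_py strip_latex_wrappers_py_alt
  dsimp only
  set l := s.toList with hl
  have hE0 : pvE l 0 l.length = l := by simp [pvE]
  have h0 : PySem.Chars.strip l
      = pvE l (pvSkip l 0 l.length).1 (pvSkip l 0 l.length).2 := by
    have hs := pv_strip_E l 0 l.length (Nat.zero_le _) (le_refl _)
    rwa [hE0] at hs
  obtain ⟨hb01, hb02, hb03⟩ := pvSkip_bounds l 0 l.length (Nat.zero_le _)
  have h1 := pv_phase1_E l (pvSkip l 0 l.length).1 (pvSkip l 0 l.length).2 hb02 hb03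
  have h2 := pv_phase2_E l _ _ h1.2.2.1 (le_trans h1.2.2.2 hb03)
  have h3 := pv_phase3_E l _ _ h2.2.2.1 (le_trans h2.2.2.2 (le_trans h1.2.2.2 hb03))
  rw [h0, h1.1, h2.1, h3.1, PySem.Chars.slice_eq_listSlice, PySem.List.slice_natCast]
  rfl
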